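-- pv_equiv track=rewrite | github.com/molteniluca/software-obfuscation-techniques-validation | sotv/evaluate.py | aggregator
-- ===== SOURCE A (Python) =====
-- def aggregator(score):
--     collections_score = None
--     for lev_obf in score.keys():
--         for var in score[lev_obf].keys():
--             for reg in score[lev_obf][var].keys():
--                 if collections_score is None:
--                     collections_score = {lev_obf: {reg: score[lev_obf][var][reg]}}
--                 else:
--                     try:
--                         collections_score[lev_obf][reg] += score[lev_obf][var][reg]
--                     except KeyError:
--                         if lev_obf not in collections_score.keys():
--                             collections_score.update(**{lev_obf: {reg: score[lev_obf][var][reg]}})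
--                         else:
--                             collections_score[lev_obf].update(**{reg: score[lev_obf][var][reg]})
--     return collections_score
-- ===== SOURCE B (Python) =====
-- def aggregator(score):
--     # Pass 1: accumulate into a flat dict keyed by (level, region) tuples.
--     flat = {}
--     for lev_obf, per_var in score.items():
--         for regs in per_var.values():
--             for reg, v in regs.items():
--                 key = (lev_obf, reg)
--                 flat[key] = flat.get(key, 0) + v
--     # Pass 2: reshape the flat dict into the nested {level: {region: total}} form.
--     nested = {}
--     for (lev_obf, reg), total in flat.items():
--         nested.setdefault(lev_obf, {})[reg] = total
--     return nested or None
-- ===== Notes on version B (the rewrite author's own statement) =====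
-- stated objective: alternative
-- what changed: A accumulates directly into a live nested dict (None sentinel, try/except KeyError, in-place updates); B first sums into a flat dict keyed by (level, region) tuples and then reshapes that flat dict into the nested {level: {region: total}} result in a second pass, returning None when no leaves were seen.
import Mathlib
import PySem

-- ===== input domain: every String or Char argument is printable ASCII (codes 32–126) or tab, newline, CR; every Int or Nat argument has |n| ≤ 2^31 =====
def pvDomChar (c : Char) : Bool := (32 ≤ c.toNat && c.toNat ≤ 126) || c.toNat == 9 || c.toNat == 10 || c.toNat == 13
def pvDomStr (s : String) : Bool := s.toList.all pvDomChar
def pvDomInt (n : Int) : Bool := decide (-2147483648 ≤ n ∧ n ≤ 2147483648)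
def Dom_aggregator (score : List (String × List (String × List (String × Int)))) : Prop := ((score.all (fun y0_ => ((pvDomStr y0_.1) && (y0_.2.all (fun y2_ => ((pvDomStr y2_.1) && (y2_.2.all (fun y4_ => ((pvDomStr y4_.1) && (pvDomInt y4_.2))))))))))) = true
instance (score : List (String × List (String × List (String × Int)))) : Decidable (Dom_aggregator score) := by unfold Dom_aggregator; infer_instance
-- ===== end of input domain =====

-- B replaces A's live nested dict (with its None sentinel and try/except updates) by a flat
-- (level, region)-keyed accumulator plus a separate reshape pass; alternative decomposition, not faster.

-- ===== PORT A =====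
-- A's loop body: None-initialisation / '+=' / except-KeyError update of the live nested dict.
def aStep (cs : Option (PySem.Dict String (PySem.Dict String Int))) (lev reg : String) (v : Int) :
    Option (PySem.Dict String (PySem.Dict String Int)) :=
  match cs with
  | none => some ((PySem.Dict.empty).insert lev ((PySem.Dict.empty).insert reg v))
  | some d =>
    match d.get? lev with
    | some inner =>
      match inner.get? reg with
      | some old => some (d.insert lev (inner.insert reg (old + v)))   -- '+=' succeeds
      | none => some (d.insert lev (inner.insert reg v))               -- KeyError, lev present: inner.update(**{reg: v})
    | none => some (d.insert lev ((PySem.Dict.empty).insert reg v))    -- KeyError, lev absent: update(**{lev: {reg: v}})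

def aggregator (score : List (String × List (String × List (String × Int)))) :
    Option (List (String × List (String × Int))) :=
  let cs := score.foldl (fun cs p =>
    p.2.foldl (fun cs q =>
      q.2.foldl (fun cs r => aStep cs p.1 r.1 r.2) cs) cs) none
  cs.map (fun d => d.items.map (fun p => (p.1, p.2.items)))

-- ===== PORT B =====
-- B's reshape step: nested.setdefault(lev_obf, {})[reg] = total
def bStep (n : PySem.Dict String (PySem.Dict String Int)) (kv : (String × String) × Int) :
    PySem.Dict String (PySem.Dict String Int) :=
  let n1 := n.setdefault kv.1.1 PySem.Dict.empty
  n1.insert kv.1.1 ((n1.getD kv.1.1 PySem.Dict.empty).insert kv.1.2 kv.2)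

def aggregator_alt (score : List (String × List (String × List (String × Int)))) :
    Option (List (String × List (String × Int))) :=
  -- Pass 1: flat accumulator keyed by (level, region):  flat[key] = flat.get(key, 0) + v
  let flat : PySem.Dict (String × String) Int :=
    score.foldl (fun f p =>
      p.2.foldl (fun f q =>
        q.2.foldl (fun f r => f.insert (p.1, r.1) (f.getD (p.1, r.1) 0 + r.2)) f) f) PySem.Dict.empty
  -- Pass 2: reshape into the nested form;  'return nested or None'
  let nested := flat.items.foldl bStep PySem.Dict.empty
  if nested.items.isEmpty then none
  else some (nested.items.map (fun p => (p.1, p.2.items)))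

-- ===== PRECONDITION & SPEC =====
def Spec_aggregator (score : List (String × List (String × List (String × Int)))) (out : Option (List (String × List (String × Int)))) : Prop := out = aggregator_alt score
instance (score : List (String × List (String × List (String × Int)))) (out : Option (List (String × List (String × Int)))) : Decidable (Spec_aggregator score out) := by unfold Spec_aggregator; infer_instance

-- ===== CLAIM (what is proved, stated in full; the proofs are below) =====
def Claim_equal_aggregator : Prop := ∀ (score : List (String × List (String × List (String × Int)))), Dom_aggregator score → Spec_aggregator score (aggregator score)

-- ===== LEMMAS AND PROOFS =====

-- the input flattened to (level, region, value) triples, in traversal order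
def trips (score : List (String × List (String × List (String × Int)))) : List (String × String × Int) :=
  score.flatMap (fun p => p.2.flatMap (fun q => q.2.map (fun r => (p.1, r.1, r.2))))

-- B's flat accumulator, as a fold over the flattened triples
def flatF (l : List (String × String × Int)) : PySem.Dict (String × String) Int :=
  l.foldl (fun f t => f.insert (t.1, t.2.1) (f.getD (t.1, t.2.1) 0 + t.2.2)) PySem.Dict.empty

-- the grouped (nested) dict a flat pair list reshapes to
def grp (pairs : List ((String × String) × Int)) : PySem.Dict String (PySem.Dict String Int) :=
  PySem.Dict.mk ((PySem.Set.ofList (pairs.map (fun p => p.1.1))).map (fun lev =>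
    (lev, PySem.Dict.mk ((pairs.filter (fun p => p.1.1 == lev)).map (fun p => (p.1.2, p.2))))))

theorem trips_foldl {σ : Type} (step : σ → (String × String × Int) → σ)
    (s : σ) (score : List (String × List (String × List (String × Int)))) :
    (trips score).foldl step s =
      score.foldl (fun s p => p.2.foldl (fun s q => q.2.foldl (fun s r => step s (p.1, r.1, r.2)) s) s) s := by
  unfold trips
  simp only [List.foldl_flatMap, List.foldl_map]

theorem dict_insert_of_not_mem {κ ν : Type} [BEq κ] [LawfulBEq κ] (d : PySem.Dict κ ν) (k : κ) (v : ν)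
    (h : d.contains k = false) : d.insert k v = PySem.Dict.mk (d.items ++ [(k, v)]) := by
  apply PySem.Dict.ext
  rw [PySem.Dict.items_insert_of_not_contains _ _ h]

theorem dict_insert_of_mem {κ ν : Type} [BEq κ] [LawfulBEq κ] (d : PySem.Dict κ ν) (k : κ) (v : ν)
    (h : d.contains k = true) :
    d.insert k v = PySem.Dict.mk (d.items.map (fun p => if p.1 == k then (k, v) else p)) := by
  apply PySem.Dict.ext
  rw [PySem.Dict.items_insert_of_contains _ _ h]

theorem grp_keys (pairs : List ((String × String) × Int)) :
    (grp pairs).keys = PySem.Set.ofList (pairs.map (fun p => p.1.1)) := by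
  simp [grp, PySem.Dict.keys, List.map_map, Function.comp_def]

theorem grp_items (pairs : List ((String × String) × Int)) :
    (grp pairs).items = (PySem.Set.ofList (pairs.map (fun p => p.1.1))).map (fun lev =>
      (lev, PySem.Dict.mk ((pairs.filter (fun p => p.1.1 == lev)).map (fun p => (p.1.2, p.2))))) := rfl

theorem grp_keys_nodup (pairs : List ((String × String) × Int)) : (grp pairs).keys.Nodup := by
  rw [grp_keys]; exact PySem.Set.nodup_ofList _

theorem grp_get? (pairs : List ((String × String) × Int)) (lev : String) :
    (grp pairs).get? lev =
      if lev ∈ pairs.map (fun p => p.1.1) then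
        some (PySem.Dict.mk ((pairs.filter (fun p => p.1.1 == lev)).map (fun p => (p.1.2, p.2))))
      else none := by
  by_cases h : lev ∈ pairs.map (fun p => p.1.1)
  · rw [if_pos h]
    refine PySem.Dict.get?_of_mem_items (d := grp pairs) ?_ (grp_keys_nodup pairs)
    show _ ∈ (grp pairs).items
    unfold grp
    exact List.mem_map.mpr ⟨lev, (PySem.Set.mem_ofList _ _).mpr h, rfl⟩
  · rw [if_neg h]
    rw [PySem.Dict.get?_eq_none_iff_not_mem_keys]
    rw [grp_keys]
    exact fun hc => h ((PySem.Set.mem_ofList _ _).mp hc)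

-- regions at one level are distinct when the flat keys are
theorem inner_keys_nodup (pairs : List ((String × String) × Int)) (lev : String)
    (hn : (pairs.map (fun p => p.1)).Nodup) :
    ((pairs.filter (fun p => p.1.1 == lev)).map (fun p => p.1.2)).Nodup := by
  have hks : ((pairs.filter (fun p => p.1.1 == lev)).map (fun p => p.1)).Nodup :=
    hn.sublist (List.filter_sublist.map _)
  have heq : ((pairs.filter (fun p => p.1.1 == lev)).map (fun p => p.1.2)) =
      (((pairs.filter (fun p => p.1.1 == lev)).map (fun p => p.1)).map (fun k => k.2)) := by
    simp [List.map_map, Function.comp_def]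
  rw [heq]
  refine List.Nodup.map_on ?_ hks
  intro x hx y hy hxy
  obtain ⟨p, hp, rfl⟩ := List.mem_map.mp hx
  obtain ⟨q, hq, rfl⟩ := List.mem_map.mp hy
  have h1 : p.1.1 = lev := by simpa using (List.mem_filter.mp hp).2
  have h2 : q.1.1 = lev := by simpa using (List.mem_filter.mp hq).2
  exact Prod.ext (h1.trans h2.symm) hxy

-- appending a triple with a fresh (lev, reg) key
theorem grp_append (pairs : List ((String × String) × Int)) (lev reg : String) (w : Int)
    (h : (lev, reg) ∉ pairs.map (fun p => p.1)) :
    grp (pairs ++ [((lev, reg), w)]) =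
      match (grp pairs).get? lev with
      | none => (grp pairs).insert lev ((PySem.Dict.empty).insert reg w)
      | some inner => (grp pairs).insert lev (inner.insert reg w) := by
  have hmapapp : (pairs ++ [((lev, reg), w)]).map (fun p => p.1.1) = pairs.map (fun p => p.1.1) ++ [lev] := by
    simp
  by_cases hm : lev ∈ pairs.map (fun p => p.1.1)
  · rw [grp_get?, if_pos hm]
    have hmS : lev ∈ PySem.Set.ofList (pairs.map (fun p => p.1.1)) := (PySem.Set.mem_ofList _ _).mpr hm
    have hcont : (grp pairs).contains lev = true := by
      rw [PySem.Dict.contains_eq_decide_mem_keys, grp_keys]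
      simpa using hmS
    have hreg : reg ∉ (pairs.filter (fun p => p.1.1 == lev)).map (fun p => p.1.2) := by
      intro hc
      obtain ⟨p, hp, hp2⟩ := List.mem_map.mp hc
      have h1 : p.1.1 = lev := by simpa using (List.mem_filter.mp hp).2
      exact h (List.mem_map.mpr ⟨p, (List.mem_filter.mp hp).1, Prod.ext h1 hp2⟩)
    have hregc : (PySem.Dict.mk ((pairs.filter (fun p => p.1.1 == lev)).map (fun p => (p.1.2, p.2)))).contains reg = false := by
      rw [PySem.Dict.contains_eq_decide_mem_keys]
      simp only [PySem.Dict.keys_mk, List.map_map]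
      simpa [Function.comp_def] using hreg
    show grp (pairs ++ [((lev, reg), w)]) = (grp pairs).insert lev _
    rw [dict_insert_of_mem _ _ _ hcont]
    apply PySem.Dict.ext
    show _ = ((grp pairs).items.map _)
    rw [grp_items, grp_items, hmapapp, PySem.Set.ofList_append_singleton, PySem.Set.add_of_mem hmS,
      List.map_map]
    refine List.map_congr_left ?_
    intro lev' _
    by_cases he : lev' = lev
    · subst he
      simp only [Function.comp_def]
      rw [if_pos (by simp)]
      refine Prod.ext rfl ?_
      rw [dict_insert_of_not_mem _ _ _ hregc]
      apply congrArg
      simp [List.filter_append]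
    · simp only [Function.comp_def]
      rw [if_neg (by simpa using he)]
      refine Prod.ext rfl ?_
      apply congrArg
      apply congrArg
      rw [List.filter_append]
      have : (lev == lev') = false := by simpa using fun hc => he hc.symm
      simp [this]
  · rw [grp_get?, if_neg hm]
    have hmS : lev ∉ PySem.Set.ofList (pairs.map (fun p => p.1.1)) := fun hc => hm ((PySem.Set.mem_ofList _ _).mp hc)
    have hcont : (grp pairs).contains lev = false := by
      rw [PySem.Dict.contains_eq_decide_mem_keys, grp_keys]
      simpa using hmS
    show grp (pairs ++ [((lev, reg), w)]) = (grp pairs).insert lev _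
    rw [dict_insert_of_not_mem _ _ _ hcont]
    apply PySem.Dict.ext
    show _ = ((grp pairs).items ++ _)
    rw [grp_items, grp_items, hmapapp, PySem.Set.ofList_append_singleton, PySem.Set.add_of_not_mem hmS,
      List.map_append]
    refine congrArg₂ (· ++ ·) ?_ ?_
    · refine List.map_congr_left ?_
      intro lev' hlev'
      have he : lev' ≠ lev := fun hc => hmS (hc ▸ hlev')
      refine Prod.ext rfl ?_
      apply congrArg
      apply congrArg
      rw [List.filter_append]
      have : (lev == lev') = false := by simpa using fun hc => he hc.symm
      simp [this]
    · have hfilnil : pairs.filter (fun p => p.1.1 == lev) = [] := by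
        rw [List.filter_eq_nil_iff]
        intro p hp hc
        exact hm (List.mem_map.mpr ⟨p, hp, by simpa using hc⟩)
      have hemp : (PySem.Dict.empty : PySem.Dict String Int).insert reg w = PySem.Dict.mk [(reg, w)] := by
        rw [dict_insert_of_not_mem _ _ _ (by simp)]
        simp [PySem.Dict.empty]
      simp [List.filter_append, hfilnil, hemp]

-- bumping an existing (lev, reg) key in place
theorem grp_replace (pairs : List ((String × String) × Int)) (lev reg : String) (old v : Int)
    (hmem : ((lev, reg), old) ∈ pairs) :
    grp (pairs.map (fun p => if p.1 == (lev, reg) then ((lev, reg), old + v) else p)) =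
      (grp pairs).insert lev
        ((PySem.Dict.mk ((pairs.filter (fun p => p.1.1 == lev)).map (fun p => (p.1.2, p.2)))).insert reg (old + v)) := by
  have hm : lev ∈ pairs.map (fun p => p.1.1) := List.mem_map.mpr ⟨_, hmem, rfl⟩
  have hmS : lev ∈ PySem.Set.ofList (pairs.map (fun p => p.1.1)) := (PySem.Set.mem_ofList _ _).mpr hm
  have hcont : (grp pairs).contains lev = true := by
    rw [PySem.Dict.contains_eq_decide_mem_keys, grp_keys]
    simpa using hmS
  have hinmem : (reg, old) ∈ (pairs.filter (fun p => p.1.1 == lev)).map (fun p => (p.1.2, p.2)) :=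
    List.mem_map.mpr ⟨_, List.mem_filter.mpr ⟨hmem, by simp⟩, rfl⟩
  have hinc : (PySem.Dict.mk ((pairs.filter (fun p => p.1.1 == lev)).map (fun p => (p.1.2, p.2)))).contains reg = true := by
    rw [PySem.Dict.contains_eq_decide_mem_keys]
    simp only [PySem.Dict.keys_mk]
    simpa using ⟨old, hmem⟩
  have hpred : ∀ lev' : String, ∀ p ∈ pairs,
      ((if p.1 == (lev, reg) then ((lev, reg), old + v) else p).1.1 == lev') = (p.1.1 == lev') := by
    intro lev' p _
    by_cases hp : p.1 = (lev, reg)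
    · simp [hp]
    · simp [hp]
  have hkeymap : (pairs.map (fun p => if p.1 == (lev, reg) then ((lev, reg), old + v) else p)).map (fun p => p.1.1)
      = pairs.map (fun p => p.1.1) := by
    rw [List.map_map]
    refine List.map_congr_left ?_
    intro p _
    by_cases hp : p.1 = (lev, reg)
    · simp [hp]
    · simp [hp]
  rw [dict_insert_of_mem _ _ _ hcont]
  apply PySem.Dict.ext
  show _ = ((grp pairs).items.map _)
  rw [grp_items, grp_items, hkeymap, List.map_map]
  refine List.map_congr_left ?_
  intro lev' _
  simp only [Function.comp_def]
  by_cases he : lev' = lev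
  · rw [he, if_pos (by simp)]
    refine Prod.ext rfl ?_
    rw [dict_insert_of_mem _ _ _ hinc]
    apply PySem.Dict.ext
    show _ = _
    rw [List.filter_map]
    simp only [Function.comp_def]
    rw [List.filter_congr (hpred lev), List.map_map, List.map_map]
    refine List.map_congr_left ?_
    intro p hp
    have hl : p.1.1 = lev := by simpa using (List.mem_filter.mp hp).2
    by_cases hpk : p.1 = (lev, reg)
    · simp [hpk]
    · have hne : p.1.2 ≠ reg := fun hc => hpk (Prod.ext hl hc)
      simp [hpk, hne]
  · rw [if_neg (by simpa using he)]
    refine Prod.ext rfl ?_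
    apply PySem.Dict.ext
    show _ = _
    rw [List.filter_map]
    simp only [Function.comp_def]
    rw [List.filter_congr (hpred lev'), List.map_map]
    simp only [Function.comp_def]
    refine List.map_congr_left ?_
    intro p hp
    have hl : p.1.1 = lev' := by simpa using (List.mem_filter.mp hp).2
    have hpk : p.1 ≠ (lev, reg) := by
      intro hc
      exact he (by rw [← hl, hc])
    simp [hpk]

theorem insert_empty {κ ν : Type} [BEq κ] [LawfulBEq κ] (k : κ) (v : ν) :
    (PySem.Dict.empty : PySem.Dict κ ν).insert k v = PySem.Dict.mk [(k, v)] := by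
  rw [dict_insert_of_not_mem _ _ _ (PySem.Dict.contains_empty _)]
  rfl

theorem flatF_append (l : List (String × String × Int)) (t : String × String × Int) :
    flatF (l ++ [t]) = (flatF l).insert (t.1, t.2.1) ((flatF l).getD (t.1, t.2.1) 0 + t.2.2) := by
  unfold flatF
  rw [List.foldl_append]
  simp only [List.foldl_cons, List.foldl_nil]

theorem flatF_keys_eq (l : List (String × String × Int)) :
    (flatF l).keys = PySem.Set.ofList (l.map (fun t => (t.1, t.2.1))) := by
  unfold flatF
  rw [PySem.Dict.keys_foldl_insert_key l (fun t => (t.1, t.2.1))]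
  rw [PySem.Dict.keys_empty, PySem.Set.update_nil_left]

theorem flatF_keys_nodup (l : List (String × String × Int)) : (flatF l).keys.Nodup := by
  unfold flatF
  exact PySem.Dict.nodup_keys_foldl_insert_key l (fun t => (t.1, t.2.1)) _ _ (by simp [PySem.Dict.keys_empty])

theorem flatF_items_nodup (l : List (String × String × Int)) :
    ((flatF l).items.map (fun p => p.1)).Nodup := flatF_keys_nodup l

-- A's fold over the flattened triples computes the reshape of B's flat accumulator
theorem mainA (l : List (String × String × Int)) :
    l.foldl (fun cs t => aStep cs t.1 t.2.1 t.2.2) none =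
      if l = [] then none else some (grp (flatF l).items) := by
  induction l using List.reverseRecOn with
  | nil => rfl
  | append_singleton l t ih =>
    obtain ⟨lev, reg, v⟩ := t
    rw [List.foldl_append, ih]
    simp only [List.foldl_cons, List.foldl_nil]
    by_cases hl : l = []
    · subst hl
      rw [if_pos rfl, if_neg (by simp)]
      simp only [List.nil_append]
      have h1 : flatF [(lev, reg, v)] = PySem.Dict.mk [((lev, reg), 0 + v)] := by
        have := flatF_append [] (lev, reg, v)
        simp only [List.nil_append] at this
        rw [this]
        show (PySem.Dict.empty : PySem.Dict (String × String) Int).insert (lev, reg)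
          ((PySem.Dict.empty : PySem.Dict (String × String) Int).getD (lev, reg) 0 + v) = _
        rw [PySem.Dict.getD_empty, insert_empty]
      rw [h1]
      show some ((PySem.Dict.empty.insert lev (PySem.Dict.empty.insert reg v))) = _
      rw [insert_empty, insert_empty]
      apply congrArg
      apply PySem.Dict.ext
      show [(lev, PySem.Dict.mk [(reg, v)])] = (grp [((lev, reg), 0 + v)]).items
      rw [grp_items]
      simp only [List.map_cons, List.map_nil]
      rw [show PySem.Set.ofList [lev] = [lev] from PySem.Set.ofList_eq_self_of_nodup _ (by simp)]
      simp [zero_add]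
    · rw [if_neg hl, if_neg (by simp [hl])]
      have hnd : (((flatF l).items).map (fun p => p.1)).Nodup := flatF_items_nodup l
      by_cases hc : (flatF l).contains (lev, reg)
      · obtain ⟨old, hold⟩ : ∃ old, (flatF l).get? (lev, reg) = some old := by
          rw [PySem.Dict.contains_eq_isSome_get?] at hc
          exact Option.isSome_iff_exists.mp hc
        have hgetD : (flatF l).getD (lev, reg) 0 = old := PySem.Dict.getD_of_get?_eq_some _ _ hold
        have hmem : ((lev, reg), old) ∈ (flatF l).items := PySem.Dict.mem_items_of_get?_eq_some _ hold
        have hitems : (flatF (l ++ [(lev, reg, v)])).items =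
            (flatF l).items.map (fun p => if p.1 == (lev, reg) then ((lev, reg), old + v) else p) := by
          rw [flatF_append]
          rw [PySem.Dict.items_insert_of_contains _ _ hc]
          rw [hgetD]
        rw [hitems, grp_replace _ lev reg old v hmem]
        have hmm : lev ∈ ((flatF l).items).map (fun p => p.1.1) := List.mem_map.mpr ⟨_, hmem, rfl⟩
        have hg : (grp ((flatF l).items)).get? lev = some (PySem.Dict.mk
            ((((flatF l).items).filter (fun p => p.1.1 == lev)).map (fun p => (p.1.2, p.2)))) := by
          rw [grp_get?, if_pos hmm]
        have hregmem : (reg, old) ∈ (((flatF l).items).filter (fun p => p.1.1 == lev)).map (fun p => (p.1.2, p.2)) :=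
          List.mem_map.mpr ⟨_, List.mem_filter.mpr ⟨hmem, by simp⟩, rfl⟩
        have hinng : (PySem.Dict.mk ((((flatF l).items).filter (fun p => p.1.1 == lev)).map
            (fun p => (p.1.2, p.2)))).get? reg = some old := by
          refine PySem.Dict.get?_of_mem_items _ hregmem ?_
          simp only [PySem.Dict.keys_mk, List.map_map]
          have := inner_keys_nodup ((flatF l).items) lev hnd
          simpa [Function.comp_def] using this
        show aStep (some (grp ((flatF l).items))) lev reg v = _
        simp only [aStep, hg, hinng]
      · have hcf : (flatF l).contains (lev, reg) = false := by simpa using hc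
        have hnotm : (lev, reg) ∉ ((flatF l).items).map (fun p => p.1) := by
          rw [PySem.Dict.contains_eq_decide_mem_keys] at hcf
          simp only [PySem.Dict.keys] at hcf
          simpa using hcf
        have hgetD0 : (flatF l).getD (lev, reg) 0 = 0 :=
          PySem.Dict.getD_of_not_contains (d := flatF l) (k := (lev, reg)) (d0 := 0) (by simpa using hc)
        have hitems : (flatF (l ++ [(lev, reg, v)])).items = (flatF l).items ++ [((lev, reg), 0 + v)] := by
          rw [flatF_append, PySem.Dict.items_insert_of_not_contains _ _ (by simpa using hc), hgetD0]
        rw [hitems, grp_append _ lev reg (0 + v) hnotm]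
        show aStep (some (grp ((flatF l).items))) lev reg v = _
        cases hg : (grp ((flatF l).items)).get? lev with
        | none => simp only [aStep, hg, zero_add]
        | some inner =>
          have hinn : inner.get? reg = none := by
            rw [grp_get?] at hg
            by_cases hmm : lev ∈ ((flatF l).items).map (fun p => p.1.1)
            · rw [if_pos hmm] at hg
              cases hg
              rw [PySem.Dict.get?_eq_none_iff_not_mem_keys]
              simp only [PySem.Dict.keys_mk, List.map_map]
              intro hcmem
              simp only [List.mem_map, Function.comp_def] at hcmem
              obtain ⟨p, hp, hp2⟩ := hcmem
              have h1 : p.1.1 = lev := by simpa using (List.mem_filter.mp hp).2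
              exact hnotm (List.mem_map.mpr ⟨p, (List.mem_filter.mp hp).1, Prod.ext h1 hp2⟩)
            · rw [if_neg hmm] at hg
              cases hg
          simp only [aStep, hg, hinn, zero_add]

-- B's reshape pass computes grp on any flat dict with distinct keys
theorem mainB (pairs : List ((String × String) × Int)) (hn : (pairs.map (fun p => p.1)).Nodup) :
    pairs.foldl bStep PySem.Dict.empty = grp pairs := by
  induction pairs using List.reverseRecOn with
  | nil => rfl
  | append_singleton pairs x ih =>
    obtain ⟨⟨lev, reg⟩, w⟩ := x
    have hn' : (pairs.map (fun p => p.1)).Nodup ∧ (lev, reg) ∉ pairs.map (fun p => p.1) := by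
      have h2 := hn
      rw [show (pairs ++ [((lev, reg), w)]).map (fun p => p.1) = pairs.map (fun p => p.1) ++ [(lev, reg)] by simp]
        at h2
      exact ⟨h2.sublist (List.sublist_append_left _ _),
        fun hc => (List.disjoint_of_nodup_append h2) hc (by simp)⟩
    rw [List.foldl_append, ih hn'.1]
    simp only [List.foldl_cons, List.foldl_nil]
    rw [grp_append _ lev reg w hn'.2]
    unfold bStep
    by_cases hc : (grp pairs).contains lev
    · have hmm : lev ∈ pairs.map (fun p => p.1.1) := by
        rw [PySem.Dict.contains_eq_decide_mem_keys, grp_keys] at hc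
        simpa [PySem.Set.mem_ofList] using hc
      have hg : (grp pairs).get? lev = some (PySem.Dict.mk
          ((pairs.filter (fun p => p.1.1 == lev)).map (fun p => (p.1.2, p.2)))) := by
        rw [grp_get?, if_pos hmm]
      simp only [hg]
      show (let n1 := (grp pairs).setdefault lev PySem.Dict.empty
        n1.insert lev ((n1.getD lev PySem.Dict.empty).insert reg w)) = _
      rw [PySem.Dict.setdefault_of_contains _ _ hc]
      show (grp pairs).insert lev (((grp pairs).getD lev PySem.Dict.empty).insert reg w) = _
      rw [PySem.Dict.getD_of_get?_eq_some _ _ hg]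
    · have hg : (grp pairs).get? lev = none := by
        rw [grp_get?, if_neg]
        intro hmm
        rw [PySem.Dict.contains_eq_decide_mem_keys, grp_keys] at hc
        exact hc (by simpa [PySem.Set.mem_ofList] using hmm)
      simp only [hg]
      show (let n1 := (grp pairs).setdefault lev PySem.Dict.empty
        n1.insert lev ((n1.getD lev PySem.Dict.empty).insert reg w)) = _
      rw [PySem.Dict.setdefault_of_not_contains _ _ (by simpa using hc)]
      show ((grp pairs).insert lev PySem.Dict.empty).insert lev
          ((((grp pairs).insert lev PySem.Dict.empty).getD lev PySem.Dict.empty).insert reg w) = _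
      rw [PySem.Dict.getD_insert_self, PySem.Dict.insert_insert_self]

theorem tripsA (score : List (String × List (String × List (String × Int)))) :
    score.foldl (fun cs p => p.2.foldl (fun cs q => q.2.foldl (fun cs r => aStep cs p.1 r.1 r.2) cs) cs) none =
      (trips score).foldl (fun cs t => aStep cs t.1 t.2.1 t.2.2) none :=
  (trips_foldl (fun cs t => aStep cs t.1 t.2.1 t.2.2) none score).symm

theorem tripsB (score : List (String × List (String × List (String × Int)))) :
    score.foldl (fun f p => p.2.foldl (fun f q => q.2.foldl
        (fun f r => f.insert (p.1, r.1) (f.getD (p.1, r.1) 0 + r.2)) f) f) PySem.Dict.empty =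
      flatF (trips score) :=
  (trips_foldl (fun f t => f.insert (t.1, t.2.1) (f.getD (t.1, t.2.1) 0 + t.2.2)) PySem.Dict.empty score).symm

theorem grp_items_ne_nil (l : List (String × String × Int)) (hl : l ≠ []) :
    (grp ((flatF l).items)).items ≠ [] := by
  obtain ⟨t, l', rfl⟩ := List.exists_cons_of_ne_nil hl
  intro hc
  rw [grp_items] at hc
  have h0 : (flatF (t :: l')).items ≠ [] := by
    intro hi
    have hk : (flatF (t :: l')).keys = [] := by
      show (flatF (t :: l')).items.map _ = []
      rw [hi]
      rfl
    rw [flatF_keys_eq] at hk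
    simp [PySem.Set.ofList_cons] at hk
  have : ((flatF (t :: l')).items.map (fun p => p.1.1)) ≠ [] := by
    simpa using h0
  obtain ⟨q, qs, hq⟩ := List.exists_cons_of_ne_nil this
  rw [hq, PySem.Set.ofList_cons] at hc
  simp at hc

-- ===== VERDICT (by name: the statement is the Claim_ definition above) =====
theorem aggregator_spec : Claim_equal_aggregator := by
  unfold Claim_equal_aggregator Spec_aggregator
  intro score _
  simp only [aggregator, aggregator_alt]
  rw [tripsA, tripsB, mainA (trips score), mainB ((flatF (trips score)).items) (flatF_items_nodup _)]
  by_cases he : trips score = []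
  · rw [if_pos he, he]
    rfl
  · rw [if_neg he]
    rw [if_neg (by simpa [List.isEmpty_iff] using grp_items_ne_nil _ he)]
    rfl
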